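-- pv_equiv track=rewrite | github.com/mei-t/algorithm_study | cracking_the_coding_interview/17-7.py | create_name_list
-- ===== SOURCE A (Python) =====
-- def merge(repre, name, name_to_repre, repre_to_name):
--     for n in repre_to_name[name]:
--         name_to_repre[n] = repre
--         repre_to_name[repre].append(n)
--     del repre_to_name[name]
--
-- def create_name_list(names, synonyms):
--     name_to_repre = dict()
--     repre_to_name = dict()
--     for s in synonyms:
--         if s[0] in name_to_repre and s[1] in name_to_repre:
--             if name_to_repre[s[0]] == name_to_repre[s[1]]:
--                 continue
--             merge(name_to_repre[s[0]], name_to_repre[s[1]], name_to_repre, repre_to_name)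
--             continue
--         if s[0] in name_to_repre:
--             repre = name_to_repre[s[0]]
--             name_to_repre[s[1]] = repre
--             repre_to_name[repre].append(s[1])
--         elif s[1] in name_to_repre:
--             repre = name_to_repre[s[1]]
--             name_to_repre[s[0]] = repre
--             repre_to_name[repre].append(s[0])
--         else:
--             name_to_repre[s[0]] = s[0]
--             name_to_repre[s[1]] = s[0]
--             repre_to_name[s[0]] = [s[0], s[1]]
--
--     res = dict()
--     for repre in repre_to_name:
--         res[repre] = 0
--         for name in repre_to_name[repre]:
--             if name in names:
--                 res[repre] += names[name]
--
--     return res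
-- ===== SOURCE B (Python) =====
-- def create_name_list(names, synonyms):
--     # Union-find: parent pointers instead of relabelling whole groups on merge.
--     parent = {}
--     roots = {}  # ordered set of the current representatives
--
--     def find(x):
--         while parent[x] != x:
--             x = parent[x]
--         return x
--
--     for a, b in synonyms:
--         a_new = a not in parent
--         b_new = b not in parent
--         if a_new:
--             parent[a] = a
--             roots[a] = None
--         if b_new:
--             parent[b] = b
--             roots[b] = None
--         ra, rb = find(a), find(b)
--         if ra != rb:
--             # A's rule: when s[0] is fresh and s[1] known, s[1]'s representative
--             # survives; in every other case s[0]'s side survives.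
--             if a_new and not b_new:
--                 winner, loser = rb, ra
--             else:
--                 winner, loser = ra, rb
--             parent[loser] = winner
--             del roots[loser]
--
--     res = {r: 0 for r in roots}
--     for n in parent:
--         r = find(n)
--         res[r] = res.get(r, 0) + names.get(n, 0)
--     return res
-- ===== Notes on version B (the rewrite author's own statement) =====
-- stated objective: alternative
-- what changed: A maintains explicit member lists per group and on every merge relabels each member of the absorbed group and copies its list; B keeps a union-find parent forest with an ordered root set, so a union is a single pointer update and per-name frequencies are accumulated by root chasing in one final pass.
-- intended difference: On inputs where some name first appears as a self-synonym pair (x, x) and has nonzero frequency, A stores x twice in its own group and returns its frequency doubled, while B counts each name once, the intended per-group frequency sum. — e.g. on create_name_list([("a", 1)], [("a", "a")]): A returns [("a", 2)], B returns [("a", 1)]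
import Mathlib
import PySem

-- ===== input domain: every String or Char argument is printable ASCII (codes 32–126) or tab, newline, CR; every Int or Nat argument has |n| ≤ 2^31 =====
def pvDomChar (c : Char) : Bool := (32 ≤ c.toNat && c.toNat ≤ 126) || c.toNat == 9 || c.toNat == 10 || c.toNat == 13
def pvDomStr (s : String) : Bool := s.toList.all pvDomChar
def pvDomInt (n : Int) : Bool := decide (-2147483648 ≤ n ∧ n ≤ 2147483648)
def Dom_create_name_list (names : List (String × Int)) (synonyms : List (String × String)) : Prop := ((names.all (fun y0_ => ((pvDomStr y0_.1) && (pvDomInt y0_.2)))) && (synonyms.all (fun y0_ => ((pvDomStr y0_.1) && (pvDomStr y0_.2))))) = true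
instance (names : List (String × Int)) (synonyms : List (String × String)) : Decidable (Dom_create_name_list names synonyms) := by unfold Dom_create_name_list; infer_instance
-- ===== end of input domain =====

-- B replaces A's group-relabelling merge (which rewrites every member of the absorbed
-- group and copies its member list) by a union-find forest: union is a single pointer
-- update and the member lists disappear.  Equal output except on the D_ corner below.

-- ===== PORT A =====
-- literal port of A's 'merge': relabel every member of group 'name' to 'repre',
-- append them to 'repre''s list, delete 'name''s list
def mergeA (repre name : String) (ntr : PySem.Dict String String)
    (rtn : PySem.Dict String (List String)) :
    PySem.Dict String String × PySem.Dict String (List String) :=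
  let st := (rtn.getD name []).foldl
    (fun (st : PySem.Dict String String × PySem.Dict String (List String)) n =>
      (st.1.insert n repre, st.2.insert repre (st.2.getD repre [] ++ [n])))
    (ntr, rtn)
  (st.1, st.2.erase name)

-- one iteration of A's 'for s in synonyms' loop
def stepA (st : PySem.Dict String String × PySem.Dict String (List String))
    (s : String × String) :
    PySem.Dict String String × PySem.Dict String (List String) :=
  let ntr := st.1
  let rtn := st.2
  if ntr.contains s.1 && ntr.contains s.2 then
    if ntr.getD s.1 "" = ntr.getD s.2 "" then st
    else mergeA (ntr.getD s.1 "") (ntr.getD s.2 "") ntr rtn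
  else if ntr.contains s.1 then
    let repre := ntr.getD s.1 ""
    (ntr.insert s.2 repre, rtn.insert repre (rtn.getD repre [] ++ [s.2]))
  else if ntr.contains s.2 then
    let repre := ntr.getD s.2 ""
    (ntr.insert s.1 repre, rtn.insert repre (rtn.getD repre [] ++ [s.1]))
  else
    ((ntr.insert s.1 s.1).insert s.2 s.1, rtn.insert s.1 [s.1, s.2])

-- A's final loop: res[repre] = 0; for each member present in 'names' add its frequency
def resA (names : List (String × Int)) (rtn : PySem.Dict String (List String)) :
    PySem.Dict String Int :=
  rtn.keys.foldl
    (fun (res : PySem.Dict String Int) r =>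
      (rtn.getD r []).foldl
        (fun res n =>
          if (PySem.Dict.mk names).contains n then
            res.insert r (res.getD r 0 + (PySem.Dict.mk names).getD n 0)
          else res)
        (res.insert r 0))
    PySem.Dict.empty

def create_name_list (names : List (String × Int)) (synonyms : List (String × String)) :
    List (String × Int) :=
  (resA names (synonyms.foldl stepA (PySem.Dict.empty, PySem.Dict.empty)).2).items

-- ===== PORT B =====
-- Source B's 'find': chase parent pointers to the root; fuel (= dict size) only makes the
-- recursion structural — on every call B makes the chain is shorter than the dict
def findB (p : PySem.Dict String String) : Nat → String → String
  | 0, x => x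
  | f+1, x =>
    let y := p.getD x x     -- parent[x]; x is always a key of p where B calls this
    if y = x then x else findB p f y

-- one iteration of Source B's union loop
def stepB (st : PySem.Dict String String × PySem.Dict String Unit)
    (s : String × String) :
    PySem.Dict String String × PySem.Dict String Unit :=
  let aNew := !st.1.contains s.1
  let bNew := !st.1.contains s.2
  let parent := if aNew then st.1.insert s.1 s.1 else st.1
  let roots := if aNew then st.2.insert s.1 () else st.2
  let parent := if bNew then parent.insert s.2 s.2 else parent
  let roots := if bNew then roots.insert s.2 () else roots
  let ra := findB parent parent.size s.1
  let rb := findB parent parent.size s.2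
  if ra = rb then (parent, roots)
  else
    let wl := if aNew && !bNew then (rb, ra) else (ra, rb)
    (parent.insert wl.2 wl.1, roots.erase wl.2)

def create_name_list_alt (names : List (String × Int)) (synonyms : List (String × String)) :
    List (String × Int) :=
  let st := synonyms.foldl stepB (PySem.Dict.empty, PySem.Dict.empty)
  let parent := st.1
  let res0 := st.2.keys.foldl
    (fun (res : PySem.Dict String Int) r => res.insert r 0) PySem.Dict.empty
  let res := parent.keys.foldl
    (fun (res : PySem.Dict String Int) n =>
      let r := findB parent parent.size n
      res.insert r (res.getD r 0 + (PySem.Dict.mk names).getD n 0))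
    res0
  res.items

-- ===== PRECONDITION & SPEC =====
-- scan for a pair (x, x) whose name has not appeared in any earlier pair and whose
-- frequency in 'names' is nonzero (the pattern on which A double-counts)
def freshSelf (names : List (String × Int)) :
    List (String × String) → List String → Bool
  | [], _ => false
  | s :: rest, seen =>
    (s.1 == s.2 && !(seen.contains s.1) && !((PySem.Dict.mk names).getD s.1 0 == 0))
      || freshSelf names rest (seen ++ [s.1, s.2])

-- On inputs whose synonym list introduces some name only through a self-pair (x, x) with
-- nonzero frequency, A lists x twice in its own group and returns its frequency doubled;
-- B counts each name once, which is the intended per-group frequency sum.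
def D_create_name_list (names : List (String × Int)) (synonyms : List (String × String)) : Prop :=
  freshSelf names synonyms [] = true
instance (names : List (String × Int)) (synonyms : List (String × String)) :
    Decidable (D_create_name_list names synonyms) := by
  unfold D_create_name_list; infer_instance

def Spec_create_name_list (names : List (String × Int)) (synonyms : List (String × String)) (out : List (String × Int)) : Prop := ¬ D_create_name_list names synonyms → out = create_name_list_alt names synonyms
instance (names : List (String × Int)) (synonyms : List (String × String)) (out : List (String × Int)) : Decidable (Spec_create_name_list names synonyms out) := by unfold Spec_create_name_list; infer_instance

def pvDiffWitness_create_name_list : (List (String × Int)) × (List (String × String)) :=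
  ([("a", 1)], [("a", "a")])
def pvDiffWitnessOut_create_name_list : (List (String × Int)) × (List (String × Int)) :=
  ([("a", 2)], [("a", 1)])

-- ===== CLAIM (what is proved, stated in full; the proofs are below) =====
def Claim_unchanged_create_name_list : Prop := ∀ (names : List (String × Int)) (synonyms : List (String × String)), Dom_create_name_list names synonyms → Spec_create_name_list names synonyms (create_name_list names synonyms)
def Claim_changed_create_name_list : Prop := Dom_create_name_list (pvDiffWitness_create_name_list.1) (pvDiffWitness_create_name_list.2) ∧ D_create_name_list (pvDiffWitness_create_name_list.1) (pvDiffWitness_create_name_list.2) ∧ create_name_list (pvDiffWitness_create_name_list.1) (pvDiffWitness_create_name_list.2) = pvDiffWitnessOut_create_name_list.1 ∧ create_name_list_alt (pvDiffWitness_create_name_list.1) (pvDiffWitness_create_name_list.2) = pvDiffWitnessOut_create_name_list.2 ∧ pvDiffWitnessOut_create_name_list.1 ≠ pvDiffWitnessOut_create_name_list.2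


-- ===== LEMMAS AND PROOFS =====

theorem pvFind?_filter_ne {ν : Type} (k x : String) (l : List (String × ν)) :
    (l.filter (fun p => !(p.1 == k))).find? (fun p => p.1 == x)
      = if x = k then none else l.find? (fun p => p.1 == x) := by
  induction l with
  | nil => simp
  | cons p l ih =>
    by_cases hpk : p.1 = k
    · have h1 : List.filter (fun q => !(q.1 == k)) (p :: l)
          = List.filter (fun q => !(q.1 == k)) l := by simp [hpk]
      rw [h1, ih]
      by_cases hxk : x = k
      · simp [hxk]
      · rw [if_neg hxk, if_neg hxk, List.find?_cons_of_neg]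
        simp only [beq_iff_eq, hpk]
        exact fun e => hxk e.symm
    · have h1 : List.filter (fun q => !(q.1 == k)) (p :: l)
          = p :: List.filter (fun q => !(q.1 == k)) l := by simp [hpk]
      rw [h1]
      by_cases hpx : p.1 = x
      · have hxk : ¬ x = k := fun e => hpk (hpx.trans e)
        rw [List.find?_cons_of_pos (by simp [hpx]), List.find?_cons_of_pos (by simp [hpx]),
          if_neg hxk]
      · rw [List.find?_cons_of_neg (by simp [hpx]), List.find?_cons_of_neg (by simp [hpx]), ih]

theorem pvGet?_erase {ν : Type} (d : PySem.Dict String ν) (k x : String) :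
    (d.erase k).get? x = if x = k then none else d.get? x := by
  simp only [PySem.Dict.erase, PySem.Dict.get?, pvFind?_filter_ne]
  split <;> rfl

theorem pvGetD_erase {ν : Type} (d : PySem.Dict String ν) (k x : String) (d0 : ν) :
    (d.erase k).getD x d0 = if x = k then d0 else d.getD x d0 := by
  simp only [PySem.Dict.getD, pvGet?_erase]; split <;> rfl

theorem pvKeys_erase {ν : Type} (d : PySem.Dict String ν) (k : String) :
    (d.erase k).keys = d.keys.filter (fun x => !(x == k)) := by
  show List.map _ (List.filter _ d.items) = List.filter _ (List.map _ d.items)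
  rw [List.filter_map]
  rfl

theorem pvMem_keys_of_get? {ν : Type} (d : PySem.Dict String ν) (k : String) (v : ν)
    (h : d.get? k = some v) : k ∈ d.keys := by
  by_contra hk
  rw [← PySem.Dict.get?_eq_none_iff_not_mem_keys] at hk
  rw [h] at hk; cases hk

theorem pvInsert_self_id {ν : Type} (d : PySem.Dict String ν) (k : String) (v : ν)
    (hnd : d.keys.Nodup) (h : d.get? k = some v) : d.insert k v = d := by
  have hc : d.contains k = true :=
    (PySem.Dict.contains_iff_mem_keys d k).mpr (pvMem_keys_of_get? d k v h)
  apply PySem.Dict.ext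
  rw [PySem.Dict.items_insert_of_contains d v hc]
  conv_rhs => rw [← List.map_id d.items]
  apply List.map_congr_left
  intro p hp
  by_cases hpk : p.1 = k
  · have h2 : d.get? p.1 = some p.2 := PySem.Dict.get?_of_mem_items d (by exact hp) hnd
    rw [hpk, h] at h2
    have hv : v = p.2 := Option.some_inj.mp h2
    obtain ⟨p1, p2⟩ := p
    simp only at hpk hv
    rw [if_pos (by simp [hpk]), hpk, hv]; rfl
  · simp [hpk]

-- parent-pointer chains: pvReach p x r k = from x one reaches the root r in k steps
inductive pvReach (p : PySem.Dict String String) : String → String → Nat → Prop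
  | root {r : String} : p.get? r = some r → pvReach p r r 0
  | step {x y r : String} {k : Nat} : p.get? x = some y → y ≠ x → pvReach p y r k →
      pvReach p x r (k+1)

theorem pvReach_root_self {p : PySem.Dict String String} {x r : String} {k : Nat}
    (h : pvReach p x r k) : p.get? r = some r := by
  induction h with
  | root hr => exact hr
  | step _ _ _ ih => exact ih

theorem pvFindB_of_reach {p : PySem.Dict String String} {x r : String} {k f : Nat}
    (h : pvReach p x r k) (hf : k ≤ f) : findB p f x = r := by
  induction h generalizing f with
  | root hr =>
    cases f with
    | zero => rfl
    | succ f => simp [findB, PySem.Dict.getD, hr]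
  | step hx hne _ ih =>
    cases f with
    | zero => omega
    | succ f =>
      simp only [findB, PySem.Dict.getD, hx, Option.getD_some]
      rw [if_neg hne]
      exact ih (by omega)

-- a chain never passes through a root other than its endpoint
theorem pvReach_insert_of_root_ne {p : PySem.Dict String String} {x r q w : String} {k : Nat}
    (hq : p.get? q = some q) (h : pvReach p x r k) (hne : r ≠ q) :
    pvReach (p.insert q w) x r k := by
  induction h with
  | root hr => exact pvReach.root (by rw [PySem.Dict.get?_insert, if_neg hne]; exact hr)
  | @step x y r k hx hxy hr ih =>
    have hxq : x ≠ q := by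
      intro e; subst e; rw [hq] at hx; exact hxy (Option.some_inj.mp hx).symm
    exact pvReach.step (by rw [PySem.Dict.get?_insert, if_neg hxq]; exact hx) hxy (ih hne)

-- inserting a FRESH key does not disturb existing chains
theorem pvReach_insert_fresh {p : PySem.Dict String String} {x r b w : String} {k : Nat}
    (hb : p.get? b = none) (h : pvReach p x r k) : pvReach (p.insert b w) x r k := by
  induction h with
  | @root r hr =>
    have hrb : r ≠ b := by intro e; subst e; rw [hb] at hr; cases hr
    exact pvReach.root (by rw [PySem.Dict.get?_insert, if_neg hrb]; exact hr)
  | @step x y r k hx hxy hr ih =>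
    have hxb : x ≠ b := by intro e; subst e; rw [hb] at hx; cases hx
    exact pvReach.step (by rw [PySem.Dict.get?_insert, if_neg hxb]; exact hx) hxy ih

-- redirecting the old root q to a root w extends every chain ending at q by one step
theorem pvReach_redirect {p : PySem.Dict String String} {x q w : String} {k : Nat}
    (h : pvReach p x q k) (hw : p.get? w = some w) (hwq : w ≠ q) :
    pvReach (p.insert q w) x w (k+1) := by
  induction h with
  | @root r hr =>
    refine pvReach.step (x := r) (by rw [PySem.Dict.get?_insert, if_pos rfl]) hwq ?_
    exact pvReach.root (by rw [PySem.Dict.get?_insert, if_neg hwq]; exact hw)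
  | @step x y r k hx hxy hr ih =>
    have hq : p.get? r = some r := pvReach_root_self hr
    have hxq : x ≠ r := by
      intro e; subst e; rw [hq] at hx; exact hxy (Option.some_inj.mp hx).symm
    exact pvReach.step (by rw [PySem.Dict.get?_insert, if_neg hxq]; exact hx) hxy (ih hwq)


theorem pvNodup_length_le {l1 l2 : List String} (h : l1.Nodup) (hs : l1 ⊆ l2) :
    l1.length ≤ l2.length := by
  classical
  calc l1.length = l1.toFinset.card := (List.toFinset_card_of_nodup h).symm
  _ ≤ l2.toFinset.card := Finset.card_le_card (by intro x hx; exact List.mem_toFinset.mpr (hs (List.mem_toFinset.mp hx)))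
  _ ≤ l2.length := l2.toFinset_card_le

theorem pvFilter_ne_length {l : List String} {b : String} (hnd : l.Nodup) (hb : b ∈ l) :
    (l.filter (fun x => !(x == b))).length + 1 = l.length := by
  have h1 : l.filter (fun x => !(x == b)) = l.erase b := by
    rw [List.Nodup.erase_eq_filter hnd]
    exact List.filter_congr (by intro x _; simp [bne])
  rw [h1, List.length_erase_of_mem hb]
  have : 1 ≤ l.length := List.length_pos_of_mem hb
  omega

theorem pvSum_filter_or (w : String → Int) (p q : String → Bool) :
    ∀ l : List String, (∀ x ∈ l, ¬(p x = true ∧ q x = true)) →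
    ((l.filter (fun x => p x || q x)).map w).sum
      = ((l.filter p).map w).sum + ((l.filter q).map w).sum := by
  intro l
  induction l with
  | nil => simp
  | cons a l ih =>
    intro hx
    have ha := hx a (by simp)
    have ih' := ih (fun x hxl => hx x (by simp [hxl]))
    by_cases hp : p a = true
    · have hq : q a = false := by
        cases hqa : q a
        · rfl
        · exact absurd ⟨hp, hqa⟩ ha
      have e1 : List.filter (fun x => p x || q x) (a :: l)
          = a :: List.filter (fun x => p x || q x) l := by simp [hp]
      have e2 : List.filter p (a :: l) = a :: List.filter p l := by simp [hp]
      have e3 : List.filter q (a :: l) = List.filter q l := by simp [hq]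
      rw [e1, e2, e3, List.map_cons, List.sum_cons, List.map_cons, List.sum_cons, ih']
      omega
    · have hp' : p a = false := by cases hpa : p a; rfl; exact absurd hpa hp
      have e2 : List.filter p (a :: l) = List.filter p l := by simp [hp']
      by_cases hq : q a = true
      · have e1 : List.filter (fun x => p x || q x) (a :: l)
            = a :: List.filter (fun x => p x || q x) l := by simp [hq]
        have e3 : List.filter q (a :: l) = a :: List.filter q l := by simp [hq]
        rw [e1, e2, e3, List.map_cons, List.sum_cons, List.map_cons, List.sum_cons, ih']
        omega
      · have hq' : q a = false := by cases hqa : q a; rfl; exact absurd hqa hq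
        have e1 : List.filter (fun x => p x || q x) (a :: l)
            = List.filter (fun x => p x || q x) l := by simp [hp', hq']
        have e3 : List.filter q (a :: l) = List.filter q l := by simp [hq']
        rw [e1, e2, e3, ih']

-- the ntr-side of A's merge loop: every member of ms is relabelled to ra
theorem pvFoldl_insert_const_get? (ra : String) :
    ∀ (ms : List String) (d : PySem.Dict String String) (x : String),
    ((ms.foldl (fun d n => d.insert n ra) d).get? x) = if x ∈ ms then some ra else d.get? x := by
  intro ms
  induction ms with
  | nil => simp
  | cons n ms ih =>
    intro d x
    rw [List.foldl_cons, ih]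
    by_cases h1 : x ∈ ms
    · simp [h1]
    · rw [if_neg h1, PySem.Dict.get?_insert]
      by_cases h2 : x = n <;> simp [h1, h2]

theorem pvFoldl_insert_const_keys (ra : String) :
    ∀ (ms : List String) (d : PySem.Dict String String), (∀ n ∈ ms, n ∈ d.keys) →
    (ms.foldl (fun d n => d.insert n ra) d).keys = d.keys := by
  intro ms
  induction ms with
  | nil => intro d _; rfl
  | cons n ms ih =>
    intro d h
    rw [List.foldl_cons]
    have hc : d.contains n = true := (PySem.Dict.contains_iff_mem_keys d n).mpr (h n (by simp))
    have hk := PySem.Dict.keys_insert_of_contains d ra hc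
    rw [ih _ (by intro m hm; rw [hk]; exact h m (by simp [hm])), hk]

-- the rtn-side of A's merge loop: ms is appended to ra's member list
theorem pvFoldl_group_append (ra : String) :
    ∀ (ms : List String) (d : PySem.Dict String (List String)) (g : List String),
    d.keys.Nodup → d.get? ra = some g →
    ms.foldl (fun d n => d.insert ra (d.getD ra [] ++ [n])) d = d.insert ra (g ++ ms) := by
  intro ms
  induction ms with
  | nil =>
    intro d g hnd hg
    rw [List.foldl_nil, List.append_nil, pvInsert_self_id d ra g hnd hg]
  | cons n ms ih =>
    intro d g hnd hg
    rw [List.foldl_cons]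
    have hgd : d.getD ra [] = g := PySem.Dict.getD_of_get?_eq_some d [] hg
    rw [hgd]
    rw [ih (d.insert ra (g ++ [n])) (g ++ [n]) (PySem.Dict.nodup_keys_insert d ra _ hnd)
      (PySem.Dict.get?_insert_self d ra (g ++ [n])),
      PySem.Dict.insert_insert_self]
    simp

-- per-name frequency weight (0 when absent from 'names', like A's membership test)
def pvW (names : List (String × Int)) (n : String) : Int := (PySem.Dict.mk names).getD n 0

-- A's inner result loop over one member list adds the member weights to res[r]
theorem pvInnerA (names : List (String × Int)) (r : String) :
    ∀ (ms : List String) (res : PySem.Dict String Int) (v : Int),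
    res.keys.Nodup → res.get? r = some v →
    ms.foldl (fun res n => if (PySem.Dict.mk names).contains n then
        res.insert r (res.getD r 0 + (PySem.Dict.mk names).getD n 0) else res) res
      = res.insert r (v + (ms.map (pvW names)).sum) := by
  intro ms
  induction ms with
  | nil =>
    intro res v hnd hv
    rw [List.foldl_nil, List.map_nil, List.sum_nil, add_zero, pvInsert_self_id res r v hnd hv]
  | cons n ms ih =>
    intro res v hnd hv
    rw [List.foldl_cons]
    by_cases hc : (PySem.Dict.mk names).contains n = true
    · rw [if_pos hc]
      have hgd : res.getD r 0 = v := PySem.Dict.getD_of_get?_eq_some res 0 hv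
      rw [hgd]
      rw [ih (res.insert r (v + (PySem.Dict.mk names).getD n 0)) _
        (PySem.Dict.nodup_keys_insert res r _ hnd)
        (PySem.Dict.get?_insert_self res r (v + (PySem.Dict.mk names).getD n 0)),
        PySem.Dict.insert_insert_self]
      simp [pvW, add_assoc]
    · rw [if_neg hc, ih res v hnd hv]
      have : pvW names n = 0 := by
        simp only [pvW]
        exact PySem.Dict.getD_of_not_contains _ _ (by cases h : (PySem.Dict.mk names).contains n; rfl; exact absurd h hc)
      simp [this]

-- A's result dict lists each group key with its member-weight sum
theorem pvOuterA (names : List (String × Int)) (rtn : PySem.Dict String (List String)) :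
    ∀ (L : List String) (res : PySem.Dict String Int),
    res.keys.Nodup → L.Nodup → (∀ r ∈ L, res.contains r = false) →
    (L.foldl (fun res r =>
        (rtn.getD r []).foldl (fun res n => if (PySem.Dict.mk names).contains n then
          res.insert r (res.getD r 0 + (PySem.Dict.mk names).getD n 0) else res)
        (res.insert r 0)) res).items
      = res.items ++ L.map (fun r => (r, ((rtn.getD r []).map (pvW names)).sum)) := by
  intro L
  induction L with
  | nil => intro res _ _ _; simp
  | cons r L ih =>
    intro res hnd hL hfresh
    rw [List.foldl_cons]
    have hcr : res.contains r = false := hfresh r (by simp)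
    rw [pvInnerA names r _ (res.insert r 0) 0 (PySem.Dict.nodup_keys_insert res r _ hnd)
      (PySem.Dict.get?_insert_self res r 0), PySem.Dict.insert_insert_self, zero_add]
    have hnd2 : (res.insert r (((rtn.getD r []).map (pvW names)).sum)).keys.Nodup :=
      PySem.Dict.nodup_keys_insert res r (((rtn.getD r []).map (pvW names)).sum) hnd
    rw [ih (res.insert r (((rtn.getD r []).map (pvW names)).sum)) hnd2 hL.of_cons ?_]
    · rw [PySem.Dict.items_insert_of_not_contains res _ hcr, List.append_assoc]
      rfl
    · intro r' hr'
      have hne : r' ≠ r := by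
        rintro rfl; exact (List.nodup_cons.mp hL).1 hr'
      rw [PySem.Dict.contains_insert]
      have hb : (r' == r) = false := by simp [hne]
      rw [hb, Bool.false_or]
      exact hfresh r' (by simp [hr'])

-- B's bump loop adds, at each group key, the weights of the names it represents
theorem pvBumpB (names : List (String × Int)) (f : String → String) :
    ∀ (ns : List String) (res : PySem.Dict String Int),
    res.keys.Nodup → (∀ n ∈ ns, res.contains (f n) = true) →
    (ns.foldl (fun res n => res.insert (f n) (res.getD (f n) 0 + (PySem.Dict.mk names).getD n 0)) res).items
      = res.items.map (fun p => (p.1, p.2 + ((ns.filter (fun n => f n == p.1)).map (pvW names)).sum)) := by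
  intro ns
  induction ns with
  | nil => intro res _ _; simp
  | cons n ns ih =>
    intro res hnd hc
    rw [List.foldl_cons]
    have hcn : res.contains (f n) = true := hc n (by simp)
    have hkeys := PySem.Dict.keys_insert_of_contains res
      (res.getD (f n) 0 + (PySem.Dict.mk names).getD n 0) hcn
    rw [ih (res.insert (f n) _) (by rw [hkeys]; exact hnd) ?_]
    · rw [PySem.Dict.items_insert_of_contains res _ hcn, List.map_map]
      apply List.map_congr_left
      rintro ⟨p1, p2⟩ hp
      have hpv : res.getD p1 0 = p2 :=
        PySem.Dict.getD_of_mem_items res (by simpa using hp) hnd 0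
      by_cases hpf : p1 = f n
      · have e0 : ((p1, p2).1 == f n) = true := by simp [hpf]
        simp only [Function.comp_apply]
        rw [if_pos e0]
        have e1 : res.getD (f n) 0 = p2 := by rw [← hpf]; exact hpv
        rw [e1, hpf]
        have e2 : List.filter (fun m => f m == f n) (n :: ns)
            = n :: List.filter (fun m => f m == f n) ns := by
          rw [List.filter_cons, if_pos (by simp)]
        rw [e2, List.map_cons, List.sum_cons, add_assoc]
        rfl
      · have e0 : ¬ (((p1, p2).1 == f n) = true) := by simp [hpf]
        simp only [Function.comp_apply]
        rw [if_neg e0]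
        have e2 : List.filter (fun m => f m == (p1, p2).1) (n :: ns)
            = List.filter (fun m => f m == (p1, p2).1) ns := by
          rw [List.filter_cons, if_neg (by simp; exact fun e => hpf e.symm)]
        rw [e2]
    · intro m hm
      rw [PySem.Dict.contains_iff_mem_keys, hkeys, ← PySem.Dict.contains_iff_mem_keys]
      exact hc m (by simp [hm])

theorem pvSize_eq_keys_len {ν : Type} (d : PySem.Dict String ν) : d.size = d.keys.length := by
  show d.items.length = (d.items.map _).length
  rw [List.length_map]

theorem pvErase_insert_fresh {ν : Type} (d : PySem.Dict String ν) (c : String) (v : ν)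
    (hc : d.contains c = false) : (d.insert c v).erase c = d := by
  apply PySem.Dict.ext
  show List.filter _ (d.insert c v).items = _
  rw [PySem.Dict.items_insert_of_not_contains d v hc, List.filter_append]
  have h1 : List.filter (fun p => !(p.1 == c)) [(c, v)] = [] := by simp
  have h2 : List.filter (fun p => !(p.1 == c)) d.items = d.items := by
    rw [List.filter_eq_self]
    intro p hp
    have := List.any_eq_false.mp hc p hp
    simpa using this
  rw [h1, h2, List.append_nil]

-- the coupling invariant between A's state (ntr, rtn) and B's state (parent, roots)
def pvInv (names : List (String × Int)) (ntr : PySem.Dict String String)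
    (rtn : PySem.Dict String (List String)) (parent : PySem.Dict String String)
    (roots : PySem.Dict String Unit) : Prop :=
  ntr.keys = parent.keys ∧
  rtn.keys = roots.keys ∧
  ntr.keys.Nodup ∧
  rtn.keys.Nodup ∧
  (∀ r ∈ rtn.keys, r ∈ ntr.keys ∧ ntr.getD r "" = r ∧ parent.get? r = some r) ∧
  (∀ n ∈ ntr.keys, ntr.getD n "" ∈ rtn.keys ∧
    ∃ k, k ≤ ntr.keys.length - rtn.keys.length ∧ pvReach parent n (ntr.getD n "") k) ∧
  (∀ r ∈ rtn.keys, ∀ n, n ∈ rtn.getD r [] ↔ (n ∈ ntr.keys ∧ ntr.getD n "" = r)) ∧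
  (∀ r ∈ rtn.keys, ((rtn.getD r []).map (pvW names)).sum
      = ((ntr.keys.filter (fun n => ntr.getD n "" == r)).map (pvW names)).sum)

theorem pvContains_false_of_not_mem {ν : Type} (d : PySem.Dict String ν) (k : String)
    (h : k ∉ d.keys) : d.contains k = false := by
  cases hc : d.contains k
  · rfl
  · exact absurd ((PySem.Dict.contains_iff_mem_keys d k).mp hc) h

theorem pvNodup_append_singleton {l : List String} {a : String} (h : l.Nodup) (ha : a ∉ l) :
    (l ++ [a]).Nodup := by
  rw [List.nodup_append]
  refine ⟨h, List.nodup_singleton a, ?_⟩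
  intro x hx b hb e
  exact ha (((List.mem_singleton.mp hb) ▸ e) ▸ hx)

-- case 'both present, different groups': A's merge = B's root redirection
theorem pvInv_merge (names : List (String × Int)) (ntr : PySem.Dict String String)
    (rtn : PySem.Dict String (List String)) (parent : PySem.Dict String String)
    (roots : PySem.Dict String Unit) (ra rb : String)
    (h : pvInv names ntr rtn parent roots)
    (hra : ra ∈ rtn.keys) (hrb : rb ∈ rtn.keys) (hne : ra ≠ rb) :
    pvInv names (mergeA ra rb ntr rtn).1 (mergeA ra rb ntr rtn).2
      (parent.insert rb ra) (roots.erase rb) := by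
  obtain ⟨e1, e2, e3, e4, e5, e6, e7, e8⟩ := h
  have hpra : parent.get? ra = some ra := (e5 ra hra).2.2
  have hprb : parent.get? rb = some rb := (e5 rb hrb).2.2
  have hgra : ntr.getD ra "" = ra := (e5 ra hra).2.1
  have hgrb : ntr.getD rb "" = rb := (e5 rb hrb).2.1
  obtain ⟨ga, hga⟩ : ∃ ga, rtn.get? ra = some ga := by
    cases hq : rtn.get? ra
    · exact absurd ((PySem.Dict.get?_eq_none_iff_not_mem_keys rtn ra).mp hq) (fun h2 => h2 hra)
    · exact ⟨_, rfl⟩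
  have hgda : rtn.getD ra [] = ga := PySem.Dict.getD_of_get?_eq_some rtn [] hga
  set gb := rtn.getD rb [] with hgbdef
  -- split the merge fold into its two independent components
  have hsplit : mergeA ra rb ntr rtn
      = ((gb.foldl (fun (d : PySem.Dict String String) n => d.insert n ra) ntr),
         ((gb.foldl (fun (d : PySem.Dict String (List String)) n => d.insert ra (d.getD ra [] ++ [n])) rtn).erase rb)) := by
    simp only [mergeA]
    rw [PySem.List.foldl_prod_mk (f := fun (d : PySem.Dict String String) (n : String) => d.insert n ra)
      (g := fun (d : PySem.Dict String (List String)) (n : String) => d.insert ra (d.getD ra [] ++ [n]))]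
  have hgbchar : ∀ n, n ∈ gb ↔ (n ∈ ntr.keys ∧ ntr.getD n "" = rb) := e7 rb hrb
  have hgbsub : ∀ n ∈ gb, n ∈ ntr.keys := fun n hn => (hgbchar n |>.mp hn).1
  -- characterise the two folds
  have hkeysN : (gb.foldl (fun d n => d.insert n ra) ntr).keys = ntr.keys :=
    pvFoldl_insert_const_keys ra gb ntr hgbsub
  have hget?N : ∀ x, (gb.foldl (fun d n => d.insert n ra) ntr).get? x
      = if x ∈ gb then some ra else ntr.get? x := fun x => pvFoldl_insert_const_get? ra gb ntr x
  have hgdN : ∀ x, (gb.foldl (fun d n => d.insert n ra) ntr).getD x ""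
      = if x ∈ gb then ra else ntr.getD x "" := by
    intro x
    rw [PySem.Dict.getD_eq_get?_getD, hget?N x]
    by_cases hx : x ∈ gb
    · rw [if_pos hx, if_pos hx]; rfl
    · rw [if_neg hx, if_neg hx, PySem.Dict.getD_eq_get?_getD]
  have hfoldR : gb.foldl (fun (d : PySem.Dict String (List String)) n => d.insert ra (d.getD ra [] ++ [n])) rtn
      = rtn.insert ra (ga ++ gb) := pvFoldl_group_append ra gb rtn ga e4 hga
  rw [hsplit, hfoldR]
  show pvInv names (gb.foldl (fun d n => d.insert n ra) ntr)
    ((rtn.insert ra (ga ++ gb)).erase rb) (parent.insert rb ra) (roots.erase rb)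
  -- getD on 'ntr' keys after the relabelling
  have hgdN' : ∀ x ∈ ntr.keys, (gb.foldl (fun d n => d.insert n ra) ntr).getD x ""
      = if ntr.getD x "" = rb then ra else ntr.getD x "" := by
    intro x hx
    rw [hgdN x]
    by_cases hm : x ∈ gb
    · rw [if_pos hm, if_pos ((hgbchar x).mp hm).2]
    · rw [if_neg hm, if_neg (fun e => hm ((hgbchar x).mpr ⟨hx, e⟩))]
  -- keys of the new group dict
  have hkra : (rtn.insert ra (ga ++ gb)).keys = rtn.keys :=
    PySem.Dict.keys_insert_of_contains rtn _ ((PySem.Dict.contains_iff_mem_keys rtn ra).mpr hra)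
  have hkeysR : ((rtn.insert ra (ga ++ gb)).erase rb).keys
      = rtn.keys.filter (fun x => !(x == rb)) := by
    rw [pvKeys_erase, hkra]
  have hkeysO : (roots.erase rb).keys = roots.keys.filter (fun x => !(x == rb)) :=
    pvKeys_erase roots rb
  have hmemF : ∀ r, r ∈ rtn.keys.filter (fun x => !(x == rb)) ↔ (r ∈ rtn.keys ∧ r ≠ rb) := by
    intro r
    rw [List.mem_filter]
    simp
  have hkeysP : (parent.insert rb ra).keys = parent.keys :=
    PySem.Dict.keys_insert_of_contains parent ra
      ((PySem.Dict.contains_iff_mem_keys parent rb).mpr (e1 ▸ (e5 rb hrb).1))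
  have hlenR : (rtn.keys.filter (fun x => !(x == rb))).length + 1 = rtn.keys.length :=
    pvFilter_ne_length e4 hrb
  have hsub : rtn.keys.length ≤ ntr.keys.length :=
    pvNodup_length_le e4 (fun x hx => (e5 x hx).1)
  -- the new group value lookups
  have hgdR : ∀ r, ((rtn.insert ra (ga ++ gb)).erase rb).getD r []
      = if r = rb then [] else if r = ra then ga ++ gb else rtn.getD r [] := by
    intro r
    rw [pvGetD_erase]
    by_cases h1 : r = rb
    · rw [if_pos h1, if_pos h1]
    · rw [if_neg h1, if_neg h1, PySem.Dict.getD_insert]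
  refine ⟨by rw [hkeysN, hkeysP, e1], by rw [hkeysR, hkeysO, e2], hkeysN ▸ e3,
    hkeysR ▸ e4.filter _, ?_, ?_, ?_, ?_⟩
  · -- roots are self-mapped
    intro r hr
    rw [hkeysR, hmemF] at hr
    obtain ⟨hr1, hr2⟩ := hr
    have hgr : ntr.getD r "" = r := (e5 r hr1).2.1
    refine ⟨by rw [hkeysN]; exact (e5 r hr1).1, ?_, ?_⟩
    · rw [hgdN' r (e5 r hr1).1, if_neg (by rw [hgr]; exact hr2), hgr]
    · rw [PySem.Dict.get?_insert, if_neg hr2]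
      exact (e5 r hr1).2.2
  · -- reachability
    intro n hn
    rw [hkeysN] at hn
    obtain ⟨hmem, k, hk, hreach⟩ := e6 n hn
    rw [hgdN' n hn]
    by_cases hcase : ntr.getD n "" = rb
    · rw [if_pos hcase]
      refine ⟨by rw [hkeysR, hmemF]; exact ⟨hra, hne⟩, k + 1, ?_, ?_⟩
      · rw [hkeysN, hkeysR]
        omega
      · rw [hcase] at hreach
        exact pvReach_redirect hreach hpra hne
    · rw [if_neg hcase]
      refine ⟨by rw [hkeysR, hmemF]; exact ⟨hmem, hcase⟩, k, ?_, ?_⟩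
      · rw [hkeysN, hkeysR]
        omega
      · exact pvReach_insert_of_root_ne hprb hreach hcase
  · -- membership characterisation of the member lists
    intro r hr n
    rw [hkeysR, hmemF] at hr
    obtain ⟨hr1, hr2⟩ := hr
    rw [hgdR r, if_neg hr2, hkeysN]
    by_cases hcr : r = ra
    · rw [if_pos hcr, List.mem_append]
      constructor
      · rintro (hm | hm)
        · have hx := (e7 ra hra n).mp (hgda ▸ hm)
          refine ⟨hx.1, ?_⟩
          rw [hgdN' n hx.1, hcr]
          rw [if_neg (by rw [hx.2]; exact hne)]
          exact hx.2
        · have hx := (hgbchar n).mp hm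
          refine ⟨hx.1, ?_⟩
          rw [hgdN' n hx.1, if_pos hx.2, hcr]
      · rintro ⟨hm, hg⟩
        rw [hgdN' n hm] at hg
        by_cases hcase : ntr.getD n "" = rb
        · right
          exact (hgbchar n).mpr ⟨hm, hcase⟩
        · left
          rw [if_neg hcase] at hg
          rw [← hgda]
          exact (e7 ra hra n).mpr ⟨hm, by rw [hg, hcr]⟩
    · rw [if_neg hcr]
      constructor
      · intro hm
        have hx := (e7 r hr1 n).mp hm
        refine ⟨hx.1, ?_⟩
        rw [hgdN' n hx.1, if_neg (by rw [hx.2]; exact hr2)]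
        exact hx.2
      · rintro ⟨hm, hg⟩
        rw [hgdN' n hm] at hg
        by_cases hcase : ntr.getD n "" = rb
        · rw [if_pos hcase] at hg
          exact absurd hg.symm hcr
        · rw [if_neg hcase] at hg
          exact (e7 r hr1 n).mpr ⟨hm, hg⟩
  · -- weight sums
    intro r hr
    rw [hkeysR, hmemF] at hr
    obtain ⟨hr1, hr2⟩ := hr
    rw [hgdR r, if_neg hr2, hkeysN]
    by_cases hcr : r = ra
    · rw [if_pos hcr, List.map_append, List.sum_append, ← hgda, e8 ra hra, hgbdef, e8 rb hrb, hcr]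
      have hfe : List.filter
            (fun n => (gb.foldl (fun d n => d.insert n ra) ntr).getD n "" == ra) ntr.keys
          = List.filter (fun n => (ntr.getD n "" == ra) || (ntr.getD n "" == rb)) ntr.keys := by
        apply List.filter_congr
        intro x hx
        rw [hgdN' x hx]
        by_cases hcase : ntr.getD x "" = rb
        · rw [if_pos hcase]
          simp [hcase]
        · rw [if_neg hcase]
          simp [hcase]
      rw [hfe, pvSum_filter_or (pvW names) _ _ ntr.keys ?_]
      · intro x hx hand
        obtain ⟨h1', h2'⟩ := hand
        rw [beq_iff_eq] at h1'
        rw [beq_iff_eq] at h2'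
        exact hne (h1'.symm.trans h2')
    · rw [if_neg hcr]
      have hfe : List.filter
            (fun n => (gb.foldl (fun d n => d.insert n ra) ntr).getD n "" == r) ntr.keys
          = List.filter (fun n => ntr.getD n "" == r) ntr.keys := by
        apply List.filter_congr
        intro x hx
        rw [hgdN' x hx]
        by_cases hcase : ntr.getD x "" = rb
        · rw [if_pos hcase]
          have c1 : (ra == r) = false := by
            simp only [beq_eq_false_iff_ne, ne_eq]
            exact fun e => hcr e.symm
          have c2 : (ntr.getD x "" == r) = false := by
            rw [hcase]
            simp only [beq_eq_false_iff_ne, ne_eq]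
            exact fun e => hr2 e.symm
          rw [c1, c2]
        · rw [if_neg hcase]
      rw [hfe]
      exact e8 r hr1

-- case 'one side present, the other fresh': A appends c to r's group = B links c under r
theorem pvInv_ext (names : List (String × Int)) (ntr : PySem.Dict String String)
    (rtn : PySem.Dict String (List String)) (parent : PySem.Dict String String)
    (roots : PySem.Dict String Unit) (r c : String)
    (h : pvInv names ntr rtn parent roots)
    (hr : r ∈ rtn.keys) (hc : c ∉ ntr.keys) :
    pvInv names (ntr.insert c r) (rtn.insert r (rtn.getD r [] ++ [c]))
      (parent.insert c r) roots := by
  obtain ⟨e1, e2, e3, e4, e5, e6, e7, e8⟩ := h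
  have hrn : r ∈ ntr.keys := (e5 r hr).1
  have hrc : r ≠ c := fun e => hc (e ▸ hrn)
  have hcp : c ∉ parent.keys := e1 ▸ hc
  have hcr : c ∉ rtn.keys := fun hm => hc (e5 c hm).1
  have hkn : (ntr.insert c r).keys = ntr.keys ++ [c] :=
    PySem.Dict.keys_insert_of_not_contains ntr r (pvContains_false_of_not_mem ntr c hc)
  have hkp : (parent.insert c r).keys = parent.keys ++ [c] :=
    PySem.Dict.keys_insert_of_not_contains parent r (pvContains_false_of_not_mem parent c hcp)
  have hkr : (rtn.insert r (rtn.getD r [] ++ [c])).keys = rtn.keys :=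
    PySem.Dict.keys_insert_of_contains rtn _ ((PySem.Dict.contains_iff_mem_keys rtn r).mpr hr)
  have hpnone : parent.get? c = none := (PySem.Dict.get?_eq_none_iff_not_mem_keys parent c).mpr hcp
  have hgd : ∀ x, (ntr.insert c r).getD x "" = if x = c then r else ntr.getD x "" :=
    fun x => PySem.Dict.getD_insert ntr c x r ""
  have hsub : rtn.keys.length ≤ ntr.keys.length :=
    pvNodup_length_le e4 (fun x hx => (e5 x hx).1)
  refine ⟨by rw [hkn, hkp, e1], by rw [hkr]; exact e2,
    hkn ▸ pvNodup_append_singleton e3 hc, hkr ▸ e4, ?_, ?_, ?_, ?_⟩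
  · -- roots are self-mapped
    intro r' hr'
    rw [hkr] at hr'
    have hr'n : r' ∈ ntr.keys := (e5 r' hr').1
    have hner : r' ≠ c := fun e => hc (e ▸ hr'n)
    refine ⟨by rw [hkn]; exact List.mem_append_left _ hr'n, ?_, ?_⟩
    · rw [hgd, if_neg hner]; exact (e5 r' hr').2.1
    · rw [PySem.Dict.get?_insert, if_neg hner]; exact (e5 r' hr').2.2
  · -- reachability
    intro n hn
    rw [hkn, List.mem_append] at hn
    have hlen : (ntr.keys ++ [c]).length = ntr.keys.length + 1 := by simp
    rcases hn with hn | hn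
    · have hne : n ≠ c := fun e => hc (e ▸ hn)
      rw [hgd, if_neg hne]
      obtain ⟨hmem, k, hk, hreach⟩ := e6 n hn
      refine ⟨by rw [hkr]; exact hmem, k, ?_, pvReach_insert_fresh hpnone hreach⟩
      rw [hkn, hkr, hlen]
      omega
    · rw [List.mem_singleton] at hn
      rw [hn, hgd, if_pos rfl]
      have hstep : pvReach (parent.insert c r) c r 1 := by
        refine pvReach.step (PySem.Dict.get?_insert_self parent c r) hrc ?_
        exact pvReach.root (by rw [PySem.Dict.get?_insert, if_neg hrc]; exact (e5 r hr).2.2)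
      refine ⟨by rw [hkr]; exact hr, 1, ?_, hstep⟩
      rw [hkn, hkr, hlen]
      omega
  · -- membership characterisation of the member lists
    intro r' hr' n
    rw [hkr] at hr'
    have hr'n : r' ∈ ntr.keys := (e5 r' hr').1
    by_cases hrr : r' = r
    · rw [hrr, PySem.Dict.getD_insert_self, hkn]
      constructor
      · intro hm
        rw [List.mem_append] at hm
        rcases hm with hm | hm
        · have hx := (e7 r hr n).mp hm
          have hne : n ≠ c := fun e => hc (e ▸ hx.1)
          rw [hgd, if_neg hne]
          exact ⟨List.mem_append_left _ hx.1, hx.2⟩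
        · rw [List.mem_singleton] at hm
          rw [hm, hgd, if_pos rfl]
          exact ⟨by simp, rfl⟩
      · rintro ⟨hm, hg⟩
        rw [List.mem_append] at hm
        rcases hm with hm | hm
        · have hne : n ≠ c := fun e => hc (e ▸ hm)
          rw [hgd, if_neg hne] at hg
          exact List.mem_append_left _ ((e7 r hr n).mpr ⟨hm, hg⟩)
        · rw [List.mem_singleton] at hm
          rw [hm]
          simp
    · rw [PySem.Dict.getD_insert, if_neg hrr, hkn]
      constructor
      · intro hm
        have hx := (e7 r' hr' n).mp hm
        have hne : n ≠ c := fun e => hc (e ▸ hx.1)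
        rw [hgd, if_neg hne]
        exact ⟨List.mem_append_left _ hx.1, hx.2⟩
      · rintro ⟨hm, hg⟩
        rw [List.mem_append] at hm
        rcases hm with hm | hm
        · have hne : n ≠ c := fun e => hc (e ▸ hm)
          rw [hgd, if_neg hne] at hg
          exact (e7 r' hr' n).mpr ⟨hm, hg⟩
        · rw [List.mem_singleton] at hm
          rw [hm, hgd, if_pos rfl] at hg
          exact absurd hg.symm hrr
  · -- weight sums
    intro r' hr'
    rw [hkr] at hr'
    have hfa : ∀ (q : String), List.filter (fun n => (ntr.insert c r).getD n "" == q) (ntr.keys)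
        = List.filter (fun n => ntr.getD n "" == q) (ntr.keys) := by
      intro q
      apply List.filter_congr
      intro x hx
      have hxc : x ≠ c := fun e => hc (e ▸ hx)
      rw [hgd, if_neg hxc]
    have hgc : (ntr.insert c r).getD c "" = r := by rw [hgd, if_pos rfl]
    by_cases hrr : r' = r
    · rw [hrr, PySem.Dict.getD_insert_self, hkn, List.filter_append, hfa]
      have hsing : List.filter (fun n => (ntr.insert c r).getD n "" == r) [c] = [c] := by
        simp [hgc]
      rw [hsing, List.map_append, List.sum_append, List.map_append, List.sum_append, e8 r hr]
    · rw [PySem.Dict.getD_insert, if_neg hrr, hkn, List.filter_append, hfa]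
      have hsing : List.filter (fun n => (ntr.insert c r).getD n "" == r') [c] = [] := by
        simp [hgc]
        exact fun e => hrr e.symm
      rw [hsing, List.append_nil]
      exact e8 r' hr'

-- case 'both fresh, distinct': a new two-element group, a is its root
theorem pvInv_fresh2 (names : List (String × Int)) (ntr : PySem.Dict String String)
    (rtn : PySem.Dict String (List String)) (parent : PySem.Dict String String)
    (roots : PySem.Dict String Unit) (a b : String)
    (h : pvInv names ntr rtn parent roots)
    (ha : a ∉ ntr.keys) (hb : b ∉ ntr.keys) (hab : a ≠ b) :
    pvInv names ((ntr.insert a a).insert b a) (rtn.insert a [a, b])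
      ((parent.insert a a).insert b a) (roots.insert a ()) := by
  obtain ⟨e1, e2, e3, e4, e5, e6, e7, e8⟩ := h
  have hpa : a ∉ parent.keys := e1 ▸ ha
  have hpb : b ∉ parent.keys := e1 ▸ hb
  have hra : a ∉ rtn.keys := fun hm => ha (e5 a hm).1
  have hoa : a ∉ roots.keys := e2 ▸ hra
  have hkn1 : (ntr.insert a a).keys = ntr.keys ++ [a] :=
    PySem.Dict.keys_insert_of_not_contains ntr a (pvContains_false_of_not_mem ntr a ha)
  have hbn1 : b ∉ (ntr.insert a a).keys := by
    rw [hkn1, List.mem_append, List.mem_singleton]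
    rintro (h | h)
    exacts [hb h, hab h.symm]
  have hkn : ((ntr.insert a a).insert b a).keys = ntr.keys ++ [a] ++ [b] := by
    rw [PySem.Dict.keys_insert_of_not_contains _ a
      (pvContains_false_of_not_mem _ b hbn1), hkn1]
  have hkp1 : (parent.insert a a).keys = parent.keys ++ [a] :=
    PySem.Dict.keys_insert_of_not_contains parent a (pvContains_false_of_not_mem parent a hpa)
  have hbp1 : b ∉ (parent.insert a a).keys := by
    rw [hkp1, List.mem_append, List.mem_singleton]
    rintro (h | h)
    exacts [hpb h, hab h.symm]
  have hkp : ((parent.insert a a).insert b a).keys = parent.keys ++ [a] ++ [b] := by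
    rw [PySem.Dict.keys_insert_of_not_contains _ a
      (pvContains_false_of_not_mem _ b hbp1), hkp1]
  have hkr : (rtn.insert a [a, b]).keys = rtn.keys ++ [a] :=
    PySem.Dict.keys_insert_of_not_contains rtn _ (pvContains_false_of_not_mem rtn a hra)
  have hko : (roots.insert a ()).keys = roots.keys ++ [a] :=
    PySem.Dict.keys_insert_of_not_contains roots _ (pvContains_false_of_not_mem roots a hoa)
  have hgd : ∀ x, ((ntr.insert a a).insert b a).getD x ""
      = if x = b then a else if x = a then a else ntr.getD x "" := by
    intro x
    rw [PySem.Dict.getD_insert, PySem.Dict.getD_insert]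
  have hpnoneA : parent.get? a = none := (PySem.Dict.get?_eq_none_iff_not_mem_keys parent a).mpr hpa
  have hpnoneB : (parent.insert a a).get? b = none :=
    (PySem.Dict.get?_eq_none_iff_not_mem_keys _ b).mpr hbp1
  have hgpa : ((parent.insert a a).insert b a).get? a = some a := by
    rw [PySem.Dict.get?_insert, if_neg hab, PySem.Dict.get?_insert_self]
  have hgpb : ((parent.insert a a).insert b a).get? b = some a :=
    PySem.Dict.get?_insert_self (parent.insert a a) b a
  have hroot_mem : ∀ n ∈ ntr.keys, ntr.getD n "" ∈ ntr.keys :=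
    fun n hn => (e5 _ (e6 n hn).1).1
  have hsub : rtn.keys.length ≤ ntr.keys.length :=
    pvNodup_length_le e4 (fun x hx => (e5 x hx).1)
  have hnodup : (ntr.keys ++ [a] ++ [b]).Nodup := by
    apply pvNodup_append_singleton (pvNodup_append_singleton e3 ha)
    rw [List.mem_append, List.mem_singleton]
    rintro (h | h)
    exacts [hb h, hab h.symm]
  refine ⟨by rw [hkn, hkp, e1], by rw [hkr, hko, e2], hkn ▸ hnodup,
    hkr ▸ pvNodup_append_singleton e4 hra, ?_, ?_, ?_, ?_⟩
  · -- roots are self-mapped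
    intro r hr
    rw [hkr, List.mem_append, List.mem_singleton] at hr
    rcases hr with hr | hr
    · have hrn : r ∈ ntr.keys := (e5 r hr).1
      have hrb : r ≠ b := fun e => hb (e ▸ hrn)
      have hraa : r ≠ a := fun e => ha (e ▸ hrn)
      refine ⟨by rw [hkn]; simp [hrn], ?_, ?_⟩
      · rw [hgd, if_neg hrb, if_neg hraa]; exact (e5 r hr).2.1
      · rw [PySem.Dict.get?_insert, if_neg hrb, PySem.Dict.get?_insert, if_neg hraa]
        exact (e5 r hr).2.2
    · rw [hr]
      exact ⟨by rw [hkn]; simp, by rw [hgd, if_neg hab, if_pos rfl], hgpa⟩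
  · -- reachability
    intro n hn
    rw [hkn, List.mem_append, List.mem_append, List.mem_singleton, List.mem_singleton] at hn
    have hlen : (ntr.keys ++ [a] ++ [b]).length - (rtn.keys ++ [a]).length
        = ntr.keys.length + 1 - rtn.keys.length := by simp
    rcases hn with (hn | hn) | hn
    · have hnb : n ≠ b := fun e => hb (e ▸ hn)
      have hna : n ≠ a := fun e => ha (e ▸ hn)
      rw [hgd, if_neg hnb, if_neg hna]
      obtain ⟨hmem, k, hk, hreach⟩ := e6 n hn
      refine ⟨by rw [hkr]; exact List.mem_append_left _ hmem, k, ?_, ?_⟩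
      · rw [hkn, hkr, hlen]; omega
      · exact pvReach_insert_fresh hpnoneB (pvReach_insert_fresh hpnoneA hreach)
    · rw [hn, hgd, if_neg hab, if_pos rfl]
      refine ⟨by rw [hkr]; simp, 0, by rw [hkn, hkr, hlen]; omega, pvReach.root hgpa⟩
    · rw [hn, hgd, if_pos rfl]
      refine ⟨by rw [hkr]; simp, 1, by rw [hkn, hkr, hlen]; omega, ?_⟩
      exact pvReach.step hgpb hab (pvReach.root hgpa)
  · -- membership characterisation of the member lists
    intro r hr n
    rw [hkr, List.mem_append, List.mem_singleton] at hr
    have hmem_char : ∀ x ∈ ntr.keys, x ≠ a ∧ x ≠ b := by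
      intro x hx
      exact ⟨fun e => ha (e ▸ hx), fun e => hb (e ▸ hx)⟩
    rcases hr with hr | hr
    · have hrne := hmem_char r (e5 r hr).1
      rw [PySem.Dict.getD_insert, if_neg hrne.1, hkn]
      constructor
      · intro hm
        have hx := (e7 r hr n).mp hm
        have hnne := hmem_char n hx.1
        rw [hgd, if_neg hnne.2, if_neg hnne.1]
        exact ⟨by simp [hx.1], hx.2⟩
      · rintro ⟨hm, hg⟩
        rw [List.mem_append, List.mem_append, List.mem_singleton, List.mem_singleton] at hm
        rcases hm with (hm | hm) | hm
        · have hnne := hmem_char n hm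
          rw [hgd, if_neg hnne.2, if_neg hnne.1] at hg
          exact (e7 r hr n).mpr ⟨hm, hg⟩
        · rw [hm, hgd, if_neg hab, if_pos rfl] at hg
          exact absurd (hg ▸ hr) hra
        · rw [hm, hgd, if_pos rfl] at hg
          exact absurd (hg ▸ hr) hra
    · rw [hr, PySem.Dict.getD_insert_self, hkn]
      constructor
      · intro hm
        rw [List.mem_cons, List.mem_singleton] at hm
        rcases hm with hm | hm
        · rw [hm]
          exact ⟨by simp, by rw [hgd, if_neg hab, if_pos rfl]⟩
        · rw [hm]
          exact ⟨by simp, by rw [hgd, if_pos rfl]⟩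
      · rintro ⟨hm, hg⟩
        rw [List.mem_append, List.mem_append, List.mem_singleton, List.mem_singleton] at hm
        rcases hm with (hm | hm) | hm
        · have hnne := hmem_char n hm
          rw [hgd, if_neg hnne.2, if_neg hnne.1] at hg
          have hx := (e6 n hm).1
          rw [hg] at hx
          exact absurd hx hra
        · rw [hm]; simp
        · rw [hm]; simp
  · -- weight sums
    intro r hr
    rw [hkr, List.mem_append, List.mem_singleton] at hr
    have hfa : ∀ (q : String),
        List.filter (fun n => ((ntr.insert a a).insert b a).getD n "" == q) (ntr.keys)
        = List.filter (fun n => ntr.getD n "" == q) (ntr.keys) := by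
      intro q
      apply List.filter_congr
      intro x hx
      have hxb : x ≠ b := by intro e; exact hb (by rw [← e]; exact hx)
      have hxa : x ≠ a := by intro e; exact ha (by rw [← e]; exact hx)
      rw [hgd, if_neg hxb, if_neg hxa]
    have hgda : ((ntr.insert a a).insert b a).getD a "" = a := by
      rw [hgd, if_neg hab, if_pos rfl]
    have hgdb : ((ntr.insert a a).insert b a).getD b "" = a := by
      rw [hgd, if_pos rfl]
    rcases hr with hr | hr
    · have hrn : r ∈ ntr.keys := (e5 r hr).1
      have hraa : r ≠ a := fun e => ha (e ▸ hrn)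
      have hrb : r ≠ b := fun e => hb (e ▸ hrn)
      rw [PySem.Dict.getD_insert, if_neg hraa, hkn, List.filter_append, List.filter_append, hfa]
      have h1 : List.filter (fun n => ((ntr.insert a a).insert b a).getD n "" == r) [a] = [] := by
        simp [hgda, Ne.symm hraa]
      have h2 : List.filter (fun n => ((ntr.insert a a).insert b a).getD n "" == r) [b] = [] := by
        simp [hgdb, Ne.symm hraa]
      rw [h1, h2, List.append_nil, List.append_nil]
      exact e8 r hr
    · rw [hr, PySem.Dict.getD_insert_self, hkn, List.filter_append, List.filter_append, hfa]
      have h1 : List.filter (fun n => ntr.getD n "" == a) ntr.keys = [] := by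
        rw [List.filter_eq_nil_iff]
        intro x hx
        simp only [beq_iff_eq]
        intro e
        have hx2 := hroot_mem x hx
        rw [e] at hx2
        exact ha hx2
      have h2 : List.filter (fun n => ((ntr.insert a a).insert b a).getD n "" == a) [a] = [a] := by
        simp [hgda]
      have h3 : List.filter (fun n => ((ntr.insert a a).insert b a).getD n "" == a) [b] = [b] := by
        simp [hgdb]
      rw [h1, h2, h3]
      simp

-- case 'fresh self-pair': A lists a twice; outside D_ its weight is 0, so sums agree
theorem pvInv_fresh_self (names : List (String × Int)) (ntr : PySem.Dict String String)
    (rtn : PySem.Dict String (List String)) (parent : PySem.Dict String String)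
    (roots : PySem.Dict String Unit) (a : String)
    (h : pvInv names ntr rtn parent roots)
    (ha : a ∉ ntr.keys) (hw : pvW names a = 0) :
    pvInv names ((ntr.insert a a).insert a a) (rtn.insert a [a, a])
      (parent.insert a a) (roots.insert a ()) := by
  obtain ⟨e1, e2, e3, e4, e5, e6, e7, e8⟩ := h
  rw [PySem.Dict.insert_insert_self]
  have hpa : a ∉ parent.keys := e1 ▸ ha
  have hra : a ∉ rtn.keys := fun hm => ha (e5 a hm).1
  have hoa : a ∉ roots.keys := e2 ▸ hra
  have hkn : (ntr.insert a a).keys = ntr.keys ++ [a] :=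
    PySem.Dict.keys_insert_of_not_contains ntr a (pvContains_false_of_not_mem ntr a ha)
  have hkp : (parent.insert a a).keys = parent.keys ++ [a] :=
    PySem.Dict.keys_insert_of_not_contains parent a (pvContains_false_of_not_mem parent a hpa)
  have hkr : (rtn.insert a [a, a]).keys = rtn.keys ++ [a] :=
    PySem.Dict.keys_insert_of_not_contains rtn _ (pvContains_false_of_not_mem rtn a hra)
  have hko : (roots.insert a ()).keys = roots.keys ++ [a] :=
    PySem.Dict.keys_insert_of_not_contains roots _ (pvContains_false_of_not_mem roots a hoa)
  have hpnone : parent.get? a = none := (PySem.Dict.get?_eq_none_iff_not_mem_keys parent a).mpr hpa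
  have hgd : ∀ x, (ntr.insert a a).getD x "" = if x = a then a else ntr.getD x "" :=
    fun x => PySem.Dict.getD_insert ntr a x a ""
  have hroot_ne : ∀ n ∈ ntr.keys, ntr.getD n "" ≠ a := by
    intro n hn e
    have hx := (e5 _ (e6 n hn).1).1
    rw [e] at hx
    exact ha hx
  refine ⟨by rw [hkn, hkp, e1], by rw [hkr, hko, e2],
    hkn ▸ pvNodup_append_singleton e3 ha, hkr ▸ pvNodup_append_singleton e4 hra, ?_, ?_, ?_, ?_⟩
  · -- roots are self-mapped
    intro r hr
    rw [hkr, List.mem_append] at hr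
    rcases hr with hr | hr
    · have hrn : r ∈ ntr.keys := (e5 r hr).1
      have hner : r ≠ a := fun e => ha (e ▸ hrn)
      refine ⟨by rw [hkn]; exact List.mem_append_left _ hrn, ?_, ?_⟩
      · rw [hgd, if_neg hner]; exact (e5 r hr).2.1
      · rw [PySem.Dict.get?_insert, if_neg hner]; exact (e5 r hr).2.2
    · rw [List.mem_singleton] at hr
      subst hr
      exact ⟨by rw [hkn]; simp, by rw [hgd, if_pos rfl], PySem.Dict.get?_insert_self parent r r⟩
  · -- reachability
    intro n hn
    rw [hkn, List.mem_append] at hn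
    have hlen : (ntr.keys ++ [a]).length - (rtn.keys ++ [a]).length
        = ntr.keys.length - rtn.keys.length := by
      simp
    rcases hn with hn | hn
    · have hne : n ≠ a := fun e => ha (e ▸ hn)
      rw [hgd, if_neg hne]
      obtain ⟨hmem, k, hk, hreach⟩ := e6 n hn
      refine ⟨by rw [hkr]; exact List.mem_append_left _ hmem, k, ?_, ?_⟩
      · rw [hkn, hkr, hlen]; exact hk
      · exact pvReach_insert_fresh hpnone hreach
    · rw [List.mem_singleton] at hn
      subst hn
      rw [hgd, if_pos rfl]
      exact ⟨by rw [hkr]; simp, 0, by omega, pvReach.root (PySem.Dict.get?_insert_self parent n n)⟩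
  · -- membership characterisation of the member lists
    intro r hr n
    rw [hkr, List.mem_append] at hr
    rcases hr with hr | hr
    · have hner : r ≠ a := fun e => hra (e ▸ hr)
      rw [PySem.Dict.getD_insert, if_neg hner, hkn]
      constructor
      · intro hm
        have hx := (e7 r hr n).mp hm
        have hne : n ≠ a := fun e => ha (e ▸ hx.1)
        rw [hgd, if_neg hne]
        exact ⟨List.mem_append_left _ hx.1, hx.2⟩
      · rintro ⟨hm, hg⟩
        rw [List.mem_append] at hm
        rcases hm with hm | hm
        · have hne : n ≠ a := by intro e; exact ha (by rw [← e]; exact hm)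
          rw [hgd, if_neg hne] at hg
          exact (e7 r hr n).mpr ⟨hm, hg⟩
        · rw [List.mem_singleton] at hm
          subst hm
          rw [hgd, if_pos rfl] at hg
          exact absurd (hg ▸ hr) hra
    · rw [List.mem_singleton] at hr
      subst hr
      rw [PySem.Dict.getD_insert_self, hkn]
      constructor
      · intro hm
        have hnr : n = r := by simpa using hm
        subst hnr
        exact ⟨by simp, by rw [hgd, if_pos rfl]⟩
      · rintro ⟨hm, hg⟩
        rw [List.mem_append] at hm
        rcases hm with hm | hm
        · have hne2 : n ≠ r := by intro e; exact ha (by rw [← e]; exact hm)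
          rw [hgd, if_neg hne2] at hg
          have hx := (e6 n hm).1
          rw [hg] at hx
          exact absurd hx hra
        · rw [List.mem_singleton] at hm
          subst hm; simp
  · -- weight sums
    intro r hr
    rw [hkr, List.mem_append] at hr
    have hfa : ∀ (r' : String), List.filter (fun n => (ntr.insert a a).getD n "" == r') (ntr.keys)
        = List.filter (fun n => ntr.getD n "" == r') (ntr.keys) := by
      intro r'
      apply List.filter_congr
      intro x hx
      have hxa : x ≠ a := by intro e; exact ha (by rw [← e]; exact hx)
      rw [hgd, if_neg hxa]
    have hga : (ntr.insert a a).getD a "" = a := by rw [hgd, if_pos rfl]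
    rcases hr with hr | hr
    · have hner : r ≠ a := fun e => hra (e ▸ hr)
      rw [PySem.Dict.getD_insert, if_neg hner, hkn, List.filter_append, hfa]
      have hsing : List.filter (fun n => (ntr.insert a a).getD n "" == r) [a] = [] := by
        simp [hga, Ne.symm hner]
      rw [hsing, List.append_nil]
      exact e8 r hr
    · rw [List.mem_singleton] at hr
      subst hr
      rw [PySem.Dict.getD_insert_self, hkn, List.filter_append, hfa]
      have h1 : List.filter (fun n => ntr.getD n "" == r) ntr.keys = [] := by
        rw [List.filter_eq_nil_iff]
        intro x hx
        simp only [beq_iff_eq]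
        exact hroot_ne x hx
      have h2 : List.filter (fun n => (ntr.insert r r).getD n "" == r) [r] = [r] := by
        simp [hga]
      rw [h1, h2]
      simp [hw]

-- keys are unchanged by A's merge
theorem pvMergeA_keys (ra rb : String) (ntr : PySem.Dict String String)
    (rtn : PySem.Dict String (List String))
    (hsub : ∀ n ∈ rtn.getD rb [], n ∈ ntr.keys) :
    (mergeA ra rb ntr rtn).1.keys = ntr.keys := by
  simp only [mergeA]
  rw [PySem.List.foldl_prod_mk (f := fun (d : PySem.Dict String String) (n : String) => d.insert n ra)
    (g := fun (d : PySem.Dict String (List String)) (n : String) => d.insert ra (d.getD ra [] ++ [n]))]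
  exact pvFoldl_insert_const_keys ra _ ntr hsub

-- one loop iteration preserves the invariant (and grows the key set by the pair's names)
theorem pvStep_inv (names : List (String × Int)) (ntr : PySem.Dict String String)
    (rtn : PySem.Dict String (List String)) (parent : PySem.Dict String String)
    (roots : PySem.Dict String Unit) (s : String × String)
    (h : pvInv names ntr rtn parent roots)
    (hsafe : s.1 = s.2 → s.1 ∉ ntr.keys → pvW names s.1 = 0) :
    pvInv names (stepA (ntr, rtn) s).1 (stepA (ntr, rtn) s).2
      (stepB (parent, roots) s).1 (stepB (parent, roots) s).2
    ∧ (∀ x, x ∈ (stepA (ntr, rtn) s).1.keys ↔ (x ∈ ntr.keys ∨ x = s.1 ∨ x = s.2)) := by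
  obtain ⟨e1, e2, e3, e4, e5, e6, e7, e8⟩ := id h
  have hszp : parent.size = ntr.keys.length := by rw [pvSize_eq_keys_len, e1]
  have hc1 : parent.contains s.1 = ntr.contains s.1 := by
    rw [PySem.Dict.contains_eq_decide_mem_keys, PySem.Dict.contains_eq_decide_mem_keys, e1]
  have hc2 : parent.contains s.2 = ntr.contains s.2 := by
    rw [PySem.Dict.contains_eq_decide_mem_keys, PySem.Dict.contains_eq_decide_mem_keys, e1]
  by_cases ca : ntr.contains s.1 = true
  · have hs1 : s.1 ∈ ntr.keys := (PySem.Dict.contains_iff_mem_keys ntr s.1).mp ca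
    obtain ⟨hmem1, k1, hk1, hre1⟩ := e6 s.1 hs1
    have hfind1 : findB parent parent.size s.1 = ntr.getD s.1 "" :=
      pvFindB_of_reach hre1 (by omega)
    by_cases cb : ntr.contains s.2 = true
    · -- CASE 1: both present
      have hs2 : s.2 ∈ ntr.keys := (PySem.Dict.contains_iff_mem_keys ntr s.2).mp cb
      obtain ⟨hmem2, k2, hk2, hre2⟩ := e6 s.2 hs2
      have hfind2 : findB parent parent.size s.2 = ntr.getD s.2 "" :=
        pvFindB_of_reach hre2 (by omega)
      have hA : stepA (ntr, rtn) s = (if ntr.getD s.1 "" = ntr.getD s.2 "" then (ntr, rtn)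
          else mergeA (ntr.getD s.1 "") (ntr.getD s.2 "") ntr rtn) := by
        simp [stepA, ca, cb]
      have hkeysiff : ∀ (d : PySem.Dict String String), d.keys = ntr.keys →
          (∀ x, x ∈ d.keys ↔ (x ∈ ntr.keys ∨ x = s.1 ∨ x = s.2)) := by
        intro d hd x
        rw [hd]
        constructor
        · exact fun hx => Or.inl hx
        · rintro (hx | hx | hx)
          · exact hx
          · rw [hx]; exact hs1
          · rw [hx]; exact hs2
      by_cases heq : ntr.getD s.1 "" = ntr.getD s.2 ""
      · have hB : stepB (parent, roots) s = (parent, roots) := by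
          simp only [stepB, hc1, hc2, ca, cb, Bool.not_true, Bool.false_eq_true, if_false]
          rw [hfind1, hfind2, if_pos heq]
        rw [hA, hB, if_pos heq]
        exact ⟨h, hkeysiff ntr rfl⟩
      · have hB : stepB (parent, roots) s
            = (parent.insert (ntr.getD s.2 "") (ntr.getD s.1 ""), roots.erase (ntr.getD s.2 "")) := by
          simp only [stepB, hc1, hc2, ca, cb, Bool.not_true, Bool.false_eq_true, if_false,
            Bool.false_and]
          rw [hfind1, hfind2, if_neg heq]
        rw [hA, hB, if_neg heq]
        refine ⟨pvInv_merge names ntr rtn parent roots _ _ h hmem1 hmem2 heq, ?_⟩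
        apply hkeysiff
        apply pvMergeA_keys
        exact fun n hn => ((e7 _ hmem2 n).mp hn).1
    · -- CASE 2: s.1 present, s.2 fresh
      have hs2 : s.2 ∉ ntr.keys := fun hm => cb ((PySem.Dict.contains_iff_mem_keys ntr s.2).mpr hm)
      have hs2p : s.2 ∉ parent.keys := e1 ▸ hs2
      have hcbf : ntr.contains s.2 = false := by
        cases hq : ntr.contains s.2
        · rfl
        · exact absurd hq cb
      have hA : stepA (ntr, rtn) s = (ntr.insert s.2 (ntr.getD s.1 ""),
          rtn.insert (ntr.getD s.1 "") (rtn.getD (ntr.getD s.1 "") [] ++ [s.2])) := by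
        simp [stepA, ca, hcbf]
      have hp2none : parent.get? s.2 = none :=
        (PySem.Dict.get?_eq_none_iff_not_mem_keys parent s.2).mpr hs2p
      have hfind1' : findB (parent.insert s.2 s.2) (parent.insert s.2 s.2).size s.1
          = ntr.getD s.1 "" := by
        apply pvFindB_of_reach (pvReach_insert_fresh hp2none hre1)
        rw [pvSize_eq_keys_len, PySem.Dict.keys_insert_of_not_contains parent s.2
          (pvContains_false_of_not_mem parent s.2 hs2p)]
        have hlen1 : ntr.keys.length = parent.keys.length := by rw [e1]
        simp
        omega
      have hfind2' : findB (parent.insert s.2 s.2) (parent.insert s.2 s.2).size s.2 = s.2 :=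
        pvFindB_of_reach (pvReach.root (PySem.Dict.get?_insert_self parent s.2 s.2)) (by omega)
      have hne : ¬ (ntr.getD s.1 "" = s.2) := by
        intro e
        exact hs2 (e ▸ (e5 _ hmem1).1)
      have hB : stepB (parent, roots) s = (parent.insert s.2 (ntr.getD s.1 ""), roots) := by
        simp only [stepB, hc1, hc2, ca, hcbf, Bool.not_true, Bool.not_false, Bool.false_eq_true,
          if_false, if_true, Bool.false_and]
        rw [hfind1', hfind2', if_neg hne]
        rw [PySem.Dict.insert_insert_self,
          pvErase_insert_fresh roots s.2 () (pvContains_false_of_not_mem roots s.2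
            (fun hm => hs2 (e5 s.2 (e2 ▸ hm)).1))]
      rw [hA, hB]
      refine ⟨pvInv_ext names ntr rtn parent roots _ s.2 h hmem1 hs2, ?_⟩
      intro x
      rw [PySem.Dict.keys_insert_of_not_contains ntr _ hcbf, List.mem_append, List.mem_singleton]
      constructor
      · rintro (hx | hx)
        · exact Or.inl hx
        · exact Or.inr (Or.inr hx)
      · rintro (hx | hx | hx)
        · exact Or.inl hx
        · rw [hx]; exact Or.inl hs1
        · exact Or.inr hx
  · -- s.1 fresh
    have hs1 : s.1 ∉ ntr.keys := fun hm => ca ((PySem.Dict.contains_iff_mem_keys ntr s.1).mpr hm)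
    have hs1p : s.1 ∉ parent.keys := e1 ▸ hs1
    have hcaf : ntr.contains s.1 = false := by
      cases hq : ntr.contains s.1
      · rfl
      · exact absurd hq ca
    have hp1none : parent.get? s.1 = none :=
      (PySem.Dict.get?_eq_none_iff_not_mem_keys parent s.1).mpr hs1p
    by_cases cb : ntr.contains s.2 = true
    · -- CASE 3: s.1 fresh, s.2 present
      have hs2 : s.2 ∈ ntr.keys := (PySem.Dict.contains_iff_mem_keys ntr s.2).mp cb
      obtain ⟨hmem2, k2, hk2, hre2⟩ := e6 s.2 hs2
      have hA : stepA (ntr, rtn) s = (ntr.insert s.1 (ntr.getD s.2 ""),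
          rtn.insert (ntr.getD s.2 "") (rtn.getD (ntr.getD s.2 "") [] ++ [s.1])) := by
        simp [stepA, hcaf, cb]
      have hfind1' : findB (parent.insert s.1 s.1) (parent.insert s.1 s.1).size s.1 = s.1 :=
        pvFindB_of_reach (pvReach.root (PySem.Dict.get?_insert_self parent s.1 s.1)) (by omega)
      have hfind2' : findB (parent.insert s.1 s.1) (parent.insert s.1 s.1).size s.2
          = ntr.getD s.2 "" := by
        apply pvFindB_of_reach (pvReach_insert_fresh hp1none hre2)
        rw [pvSize_eq_keys_len, PySem.Dict.keys_insert_of_not_contains parent s.1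
          (pvContains_false_of_not_mem parent s.1 hs1p)]
        have hlen1 : ntr.keys.length = parent.keys.length := by rw [e1]
        simp
        omega
      have hne : ¬ (s.1 = ntr.getD s.2 "") := by
        intro e
        exact hs1 (e ▸ (e5 _ hmem2).1)
      have hB : stepB (parent, roots) s = (parent.insert s.1 (ntr.getD s.2 ""), roots) := by
        simp only [stepB, hc1, hc2, hcaf, cb, Bool.not_true, Bool.not_false, Bool.false_eq_true,
          if_false, if_true, Bool.true_and]
        rw [hfind1', hfind2', if_neg hne]
        rw [PySem.Dict.insert_insert_self,
          pvErase_insert_fresh roots s.1 () (pvContains_false_of_not_mem roots s.1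
            (fun hm => hs1 (e5 s.1 (e2 ▸ hm)).1))]
      rw [hA, hB]
      refine ⟨pvInv_ext names ntr rtn parent roots _ s.1 h hmem2 hs1, ?_⟩
      intro x
      rw [PySem.Dict.keys_insert_of_not_contains ntr _ hcaf, List.mem_append, List.mem_singleton]
      constructor
      · rintro (hx | hx)
        · exact Or.inl hx
        · exact Or.inr (Or.inl hx)
      · rintro (hx | hx | hx)
        · exact Or.inl hx
        · exact Or.inr hx
        · rw [hx]; exact Or.inl hs2
    · -- both fresh
      have hs2 : s.2 ∉ ntr.keys := fun hm => cb ((PySem.Dict.contains_iff_mem_keys ntr s.2).mpr hm)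
      have hs2p : s.2 ∉ parent.keys := e1 ▸ hs2
      have hcbf : ntr.contains s.2 = false := by
        cases hq : ntr.contains s.2
        · rfl
        · exact absurd hq cb
      have hA : stepA (ntr, rtn) s
          = ((ntr.insert s.1 s.1).insert s.2 s.1, rtn.insert s.1 [s.1, s.2]) := by
        simp [stepA, hcaf, hcbf]
      by_cases hss : s.1 = s.2
      · -- CASE 5: fresh self-pair
        have hw : pvW names s.1 = 0 := hsafe hss hs1
        have hfind1' : findB ((parent.insert s.1 s.1).insert s.2 s.2)
            ((parent.insert s.1 s.1).insert s.2 s.2).size s.1 = s.1 := by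
          rw [← hss, PySem.Dict.insert_insert_self]
          exact pvFindB_of_reach (pvReach.root (PySem.Dict.get?_insert_self parent s.1 s.1))
            (by omega)
        have hB : stepB (parent, roots) s = (parent.insert s.1 s.1, roots.insert s.1 ()) := by
          simp only [stepB, hc1, hc2, hcaf, hcbf, Bool.not_false, if_true]
          rw [← hss, PySem.Dict.insert_insert_self, PySem.Dict.insert_insert_self]
          have hf : findB (parent.insert s.1 s.1) (parent.insert s.1 s.1).size s.1 = s.1 :=
            pvFindB_of_reach (pvReach.root (PySem.Dict.get?_insert_self parent s.1 s.1)) (by omega)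
          rw [hf, if_pos rfl]
        rw [hA, hB, ← hss]
        refine ⟨pvInv_fresh_self names ntr rtn parent roots s.1 h hs1 hw, ?_⟩
        intro x
        rw [PySem.Dict.insert_insert_self,
          PySem.Dict.keys_insert_of_not_contains ntr _ hcaf, List.mem_append, List.mem_singleton]
        constructor
        · rintro (hx | hx)
          · exact Or.inl hx
          · exact Or.inr (Or.inl hx)
        · rintro (hx | hx | hx)
          · exact Or.inl hx
          · exact Or.inr hx
          · exact Or.inr hx
      · -- CASE 4: both fresh, distinct
        have hs2i : s.2 ∉ (parent.insert s.1 s.1).keys := by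
          rw [PySem.Dict.keys_insert_of_not_contains parent s.1
            (pvContains_false_of_not_mem parent s.1 hs1p), List.mem_append, List.mem_singleton]
          rintro (hx | hx)
          exacts [hs2p hx, hss hx.symm]
        have hfind1' : findB ((parent.insert s.1 s.1).insert s.2 s.2)
            ((parent.insert s.1 s.1).insert s.2 s.2).size s.1 = s.1 := by
          refine pvFindB_of_reach (pvReach.root ?_) (by omega)
          rw [PySem.Dict.get?_insert, if_neg hss, PySem.Dict.get?_insert_self]
        have hfind2' : findB ((parent.insert s.1 s.1).insert s.2 s.2)
            ((parent.insert s.1 s.1).insert s.2 s.2).size s.2 = s.2 :=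
          pvFindB_of_reach (pvReach.root (PySem.Dict.get?_insert_self _ s.2 s.2)) (by omega)
        have hB : stepB (parent, roots) s
            = ((parent.insert s.1 s.1).insert s.2 s.1, roots.insert s.1 ()) := by
          simp only [stepB, hc1, hc2, hcaf, hcbf, Bool.not_false, if_true, Bool.true_and,
            Bool.not_true, Bool.false_eq_true, if_false]
          rw [hfind1', hfind2', if_neg hss]
          rw [PySem.Dict.insert_insert_self,
            pvErase_insert_fresh (roots.insert s.1 ()) s.2 () ?_]
          apply pvContains_false_of_not_mem
          rw [PySem.Dict.keys_insert_of_not_contains roots () (pvContains_false_of_not_mem roots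
            s.1 (fun hm => hs1 (e5 s.1 (e2 ▸ hm)).1)), List.mem_append, List.mem_singleton]
          rintro (hx | hx)
          exacts [hs2 (e5 s.2 (e2 ▸ hx)).1, hss hx.symm]
        rw [hA, hB]
        refine ⟨pvInv_fresh2 names ntr rtn parent roots s.1 s.2 h hs1 hs2 hss, ?_⟩
        intro x
        rw [PySem.Dict.keys_insert_of_not_contains _ s.1 ?_,
          PySem.Dict.keys_insert_of_not_contains ntr _ hcaf]
        · rw [List.mem_append, List.mem_append, List.mem_singleton, List.mem_singleton]
          constructor
          · rintro ((hx | hx) | hx)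
            · exact Or.inl hx
            · exact Or.inr (Or.inl hx)
            · exact Or.inr (Or.inr hx)
          · rintro (hx | hx | hx)
            · exact Or.inl (Or.inl hx)
            · exact Or.inl (Or.inr hx)
            · exact Or.inr hx
        · apply pvContains_false_of_not_mem
          rw [PySem.Dict.keys_insert_of_not_contains ntr _ hcaf, List.mem_append,
            List.mem_singleton]
          rintro (hx | hx)
          exacts [hs2 hx, hss hx.symm]

-- the whole loop preserves the invariant, given no harmful fresh self-pair remains
theorem pvLoop_inv (names : List (String × Int)) :
    ∀ (syns : List (String × String)) (ntr : PySem.Dict String String)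
      (rtn : PySem.Dict String (List String)) (parent : PySem.Dict String String)
      (roots : PySem.Dict String Unit) (seen : List String),
    pvInv names ntr rtn parent roots →
    freshSelf names syns seen = false →
    (∀ x, x ∈ seen ↔ x ∈ ntr.keys) →
    pvInv names (syns.foldl stepA (ntr, rtn)).1 (syns.foldl stepA (ntr, rtn)).2
      (syns.foldl stepB (parent, roots)).1 (syns.foldl stepB (parent, roots)).2 := by
  intro syns
  induction syns with
  | nil => intro ntr rtn parent roots seen h _ _; exact h
  | cons s rest ih =>
    intro ntr rtn parent roots seen h hfresh hseen
    rw [List.foldl_cons, List.foldl_cons]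
    have hfs : ((s.1 == s.2 && !(seen.contains s.1)
          && !((PySem.Dict.mk names).getD s.1 0 == 0)) = false)
        ∧ freshSelf names rest (seen ++ [s.1, s.2]) = false := by
      have := hfresh
      rw [show freshSelf names (s :: rest) seen
          = ((s.1 == s.2 && !(seen.contains s.1) && !((PySem.Dict.mk names).getD s.1 0 == 0))
            || freshSelf names rest (seen ++ [s.1, s.2])) from rfl] at this
      exact Bool.or_eq_false_iff.mp this
    have hsafe : s.1 = s.2 → s.1 ∉ ntr.keys → pvW names s.1 = 0 := by
      intro he hnm
      have hb1 : (s.1 == s.2) = true := by simp [he]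
      have hb2 : (seen.contains s.1) = false := by
        cases hq : seen.contains s.1
        · rfl
        · exact absurd ((hseen s.1).mp (by simpa using hq)) hnm
      have := hfs.1
      rw [hb1, hb2] at this
      simp at this
      simpa [pvW] using this
    obtain ⟨hinv', hkeys'⟩ := pvStep_inv names ntr rtn parent roots s h hsafe
    have hpairA : stepA (ntr, rtn) s = ((stepA (ntr, rtn) s).1, (stepA (ntr, rtn) s).2) := rfl
    have hpairB : stepB (parent, roots) s
        = ((stepB (parent, roots) s).1, (stepB (parent, roots) s).2) := rfl
    rw [hpairA, hpairB]
    apply ih _ _ _ _ (seen ++ [s.1, s.2]) hinv' hfs.2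
    intro x
    rw [List.mem_append, hkeys' x, hseen x]
    constructor
    · rintro (hx | hx)
      · exact Or.inl hx
      · rw [List.mem_cons, List.mem_singleton] at hx
        exact Or.inr hx
    · rintro (hx | hx | hx)
      · exact Or.inl hx
      · exact Or.inr (by rw [hx]; simp)
      · exact Or.inr (by rw [hx]; simp)

-- both result loops produce the same association list from related final states
theorem pvFinal (names : List (String × Int)) (ntr : PySem.Dict String String)
    (rtn : PySem.Dict String (List String)) (parent : PySem.Dict String String)
    (roots : PySem.Dict String Unit) (h : pvInv names ntr rtn parent roots) :
    (resA names rtn).items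
      = (parent.keys.foldl (fun (res : PySem.Dict String Int) n =>
          res.insert (findB parent parent.size n)
            ((res.getD (findB parent parent.size n) 0) + (PySem.Dict.mk names).getD n 0))
          (roots.keys.foldl (fun (res : PySem.Dict String Int) r => res.insert r 0)
            PySem.Dict.empty)).items := by
  obtain ⟨e1, e2, e3, e4, e5, e6, e7, e8⟩ := h
  -- A's side
  have hA : (resA names rtn).items
      = rtn.keys.map (fun r => (r, ((rtn.getD r []).map (pvW names)).sum)) := by
    unfold resA
    rw [pvOuterA names rtn rtn.keys PySem.Dict.empty (by simp [PySem.Dict.empty, PySem.Dict.keys])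
      e4 (fun r _ => by simp [PySem.Dict.empty, PySem.Dict.contains])]
    rfl
  -- B's base dict
  have hres0 : (roots.keys.foldl (fun (res : PySem.Dict String Int) r => res.insert r 0)
      PySem.Dict.empty).items = roots.keys.map (fun r => (r, (0 : Int))) := by
    rw [PySem.Dict.items_foldl_insert_fresh roots.keys (fun r => r) (fun _ => (0 : Int))
      PySem.Dict.empty (fun r _ => by simp [PySem.Dict.empty, PySem.Dict.contains])
      (by simpa using (e2 ▸ e4))]
    rfl
  have hkeys0 : (roots.keys.foldl (fun (res : PySem.Dict String Int) r => res.insert r 0)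
      PySem.Dict.empty).keys = roots.keys := by
    show (roots.keys.foldl (fun (res : PySem.Dict String Int) r => res.insert r 0)
      PySem.Dict.empty).items.map (fun p => p.1) = roots.keys
    rw [hres0, List.map_map]
    exact List.map_id roots.keys
  have hnd0 : (roots.keys.foldl (fun (res : PySem.Dict String Int) r => res.insert r 0)
      PySem.Dict.empty).keys.Nodup := by
    rw [hkeys0]; exact e2 ▸ e4
  have hfind : ∀ n ∈ parent.keys, findB parent parent.size n = ntr.getD n "" := by
    intro n hn
    obtain ⟨_, k, hk, hre⟩ := e6 n (e1 ▸ hn)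
    refine pvFindB_of_reach hre ?_
    rw [pvSize_eq_keys_len]
    have hlen1 : ntr.keys.length = parent.keys.length := by rw [e1]
    omega
  have hcont0 : ∀ n ∈ parent.keys,
      (roots.keys.foldl (fun (res : PySem.Dict String Int) r => res.insert r 0)
        PySem.Dict.empty).contains (findB parent parent.size n) = true := by
    intro n hn
    rw [PySem.Dict.contains_iff_mem_keys, hkeys0, hfind n hn]
    exact e2 ▸ (e6 n (e1 ▸ hn)).1
  rw [pvBumpB names (fun n => findB parent parent.size n) parent.keys _ hnd0 hcont0, hres0,
    List.map_map, hA, e2]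
  apply List.map_congr_left
  intro r hr
  simp only [Function.comp_apply, zero_add]
  have hrr : r ∈ rtn.keys := e2 ▸ hr
  rw [e8 r hrr]
  have hfe : List.filter (fun n => findB parent parent.size n == r) parent.keys
      = List.filter (fun n => ntr.getD n "" == r) ntr.keys := by
    rw [← e1]
    apply List.filter_congr
    intro x hx
    rw [hfind x (e1 ▸ hx)]
  rw [hfe]

-- ===== VERDICT (by name: the statement is the Claim_ definition above) =====
theorem create_name_list_spec : Claim_unchanged_create_name_list := by
  intro names syns _hdom
  unfold Spec_create_name_list
  intro hND
  have hfresh : freshSelf names syns [] = false := by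
    cases hq : freshSelf names syns []
    · rfl
    · exact absurd hq hND
  have hInv0 : pvInv names PySem.Dict.empty PySem.Dict.empty PySem.Dict.empty
      PySem.Dict.empty := by
    refine ⟨rfl, rfl, List.nodup_nil, List.nodup_nil, ?_, ?_, ?_, ?_⟩ <;>
      intro r hr <;> exact absurd hr (by simp [PySem.Dict.empty, PySem.Dict.keys])
  have hloop := pvLoop_inv names syns PySem.Dict.empty PySem.Dict.empty PySem.Dict.empty
    PySem.Dict.empty [] hInv0 hfresh
    (by intro x; simp [PySem.Dict.empty, PySem.Dict.keys])
  exact pvFinal names _ _ _ _ hloop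

theorem create_name_list_changed : Claim_changed_create_name_list := by
  unfold Claim_changed_create_name_list; decide
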